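/- GENERATED by c/gen_decode.py: decode facts of the image, one per distinct instruction byte string. -/
import UserX.DecodeImage

#decode_all Vorbis.Dec
  "0303"  -- add eax,DWORD PTR [rbx]
  "0f8404ffffff"  -- je 114020
  "0f84d4000000"  -- je 10f645
  "0f874f010000"  -- ja 10275e
  "0f8eb4000000"  -- jle 108856
  "0fb65500"  -- movzx edx,BYTE PTR [rbp+0x0]
  "31d3"  -- xor ebx,edx
  "410f28c0"  -- movaps xmm0,xmm8
  "4139c0"  -- cmp r8d,eax
  "4183fc18"  -- cmp r12d,0x18
  "4189fd"  -- mov r13d,edi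
  "41c1e603"  -- shl r14d,0x3
  "42896ca450"  -- mov DWORD PTR [rsp+r12*4+0x50],ebp
  "44396d04"  -- cmp DWORD PTR [rbp+0x4],r13d
  "44896500"  -- mov DWORD PTR [rbp+0x0],r12d
  "4489e0"  -- mov eax,r12d
  "448b7c2424"  -- mov r15d,DWORD PTR [rsp+0x24]
  "450fb737"  -- movzx r14d,WORD PTR [r15]
  "4589ef"  -- mov r15d,r13d
  "470fb72474"  -- movzx r12d,WORD PTR [r12+r14*2]
  "48634584"  -- movsxd rax,DWORD PTR [rbp-0x7c]
  "4881c59e000000"  -- add rbp,0x9e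
  "4885d2"  -- test rdx,rdx
  "4889c3"  -- mov rbx,rax
  "488b5c2408"  -- mov rbx,QWORD PTR [rsp+0x8]
  "488d0440"  -- lea rax,[rax+rax*2]
  "488d7808"  -- lea rdi,[rax+0x8]
  "488d7df4"  -- lea rdi,[rbp-0xc]
  "488dbbd3060000"  -- lea rdi,[rbx+0x6d3]
  "488dbf08070000"  -- lea rdi,[rdi+0x708]
  "48c7810800c00000000000"  -- mov QWORD PTR [rcx+0xc00008],0x0
  "49635504"  -- movsxd rdx,DWORD PTR [r13+0x4]
  "4989dc"  -- mov r12,rbx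
  "498d7c2420"  -- lea rdi,[r12+0x20]
  "498dbe74050000"  -- lea rdi,[r14+0x574]
  "4a8d7ca450"  -- lea rdi,[rsp+r12*4+0x50]
  "4c03ad30080000"  -- add r13,QWORD PTR [rbp+0x830]
  "4c89b548ffffff"  -- mov QWORD PTR [rbp-0xb8],r14
  "4c8b7d98"  -- mov r15,QWORD PTR [rbp-0x68]
  "4c8dadb2000000"  -- lea r13,[rbp+0xb2]
  "4d8b74de08"  -- mov r14,QWORD PTR [r14+rbx*8+0x8]
  "660f28ca"  -- movapd xmm1,xmm2
  "66410f6edf"  -- movd xmm3,r15d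
  "66480f7efa"  -- movq rdx,xmm7
  "741b"  -- je 1024dc
  "7502"  -- jne 1009d4
  "7725"  -- ja 102d22
  "7e06"  -- jle 104513
  "7fb1"  -- jg 1197b7
  "838560ffffff01"  -- add DWORD PTR [rbp-0xa0],0x1
  "85ed"  -- test ebp,ebp
  "896c241c"  -- mov DWORD PTR [rsp+0x1c],ebp
  "89eb"  -- mov ebx,ebp
  "8b542460"  -- mov edx,DWORD PTR [rsp+0x60]
  "8b8d44ffffff"  -- mov ecx,DWORD PTR [rbp-0xbc]
  "b820000000"  -- mov eax,0x20
  "c1e702"  -- shl edi,0x2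
  "c780c000c000f2f2f2f2"  -- mov DWORD PTR [rax+0xc000c0],0xf2f2f2f2
  "d3ea"  -- shr edx,cl
  "e8096ffeff"  -- call 100720
  "e81312ffff"  -- call 100800
  "e81c71ffff"  -- call 103d00
  "e8272bffff"  -- call 100800
  "e82f44ffff"  -- call 107f00
  "e8399fffff"  -- call 100640
  "e844fdffff"  -- call 104c60
  "e84f1fffff"  -- call 100300
  "e85ab8ffff"  -- call 104fe0
  "e86914ffff"  -- call 100640
  "e873f4feff"  -- call 103d00
  "e87e13ffff"  -- call 100640
  "e889a2feff"  -- call 100640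
  "e893a1feff"  -- call 1003c0
  "e89d6bffff"  -- call 100640
  "e8a7e9feff"  -- call 100300
  "e8b1affeff"  -- call 100640
  "e8bba8feff"  -- call 1003c0
  "e8c668ffff"  -- call 100720
  "e8d070ffff"  -- call 102dc0
  "e8da27ffff"  -- call 100720
  "e8e3beffff"  -- call 105740
  "e8ecadffff"  -- call 100640
  "e8f69fffff"  -- call 108dc0
  "e907fdffff"  -- jmp 113b22
  "e94affffff"  -- jmp 104152
  "e99edcffff"  -- jmp 113b22
  "e9f0faffff"  -- jmp 113b22
  "eb80"  -- jmp 10e871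
  "ebde"  -- jmp 102a99
  "f20f5805abd70100"  -- addsd xmm0,QWORD PTR [rip+0x1d7ab]
  "f20f5e154ce00100"  -- divsd xmm2,QWORD PTR [rip+0x1e04c]
  "f30f105310"  -- movss xmm2,DWORD PTR [rbx+0x10]
  "f30f1074240c"  -- movss xmm6,DWORD PTR [rsp+0xc]
  "f30f114dfc"  -- movss DWORD PTR [rbp-0x4],xmm1
  "f30f1175a4"  -- movss DWORD PTR [rbp-0x5c],xmm6
  "f30f58d9"  -- addss xmm3,xmm1
  "f30f59e9"  -- mulss xmm5,xmm1
  "f3410f103c24"  -- movss xmm7,DWORD PTR [r12]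
  "f3410f5906"  -- mulss xmm0,DWORD PTR [r14]
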